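-- pv_equiv track=rewrite | github.com/enowars/bambi6-service-orcanojr | checker/checker.py | flag_to_nums
-- ===== SOURCE A (Python) =====
-- def chunks(l, n):
-- 	for i in range(0, len(l), n):
-- 		yield l[i:i+n]
--
-- def flag_to_nums(flag):
-- 	nums = []
-- 	chunk_len = 3;
-- 	flag_data = flag.encode()
-- 	for ck in chunks(flag_data, chunk_len):
-- 		num = 0
-- 		for i in range(chunk_len):
-- 			num <<= 8
-- 			if i < len(ck):
-- 				num |= ck[i]
-- 		nums.append(num)
-- 	return nums
-- ===== SOURCE B (Python) =====
-- def flag_to_nums(flag):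
--     data = flag.encode()
--     data += b"\x00" * (-len(data) % 3)
--     return [int.from_bytes(data[i:i+3], "big") for i in range(0, len(data), 3)]
-- ===== Notes on version B (the rewrite author's own statement) =====
-- stated objective: idiomatic
-- what changed: B zero-pads the encoded flag to a multiple of 3 up front and converts each exact 3-byte chunk with big-endian int.from_bytes, removing A's inner shift/OR accumulator loop and its per-byte length guard.
import Mathlib
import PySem

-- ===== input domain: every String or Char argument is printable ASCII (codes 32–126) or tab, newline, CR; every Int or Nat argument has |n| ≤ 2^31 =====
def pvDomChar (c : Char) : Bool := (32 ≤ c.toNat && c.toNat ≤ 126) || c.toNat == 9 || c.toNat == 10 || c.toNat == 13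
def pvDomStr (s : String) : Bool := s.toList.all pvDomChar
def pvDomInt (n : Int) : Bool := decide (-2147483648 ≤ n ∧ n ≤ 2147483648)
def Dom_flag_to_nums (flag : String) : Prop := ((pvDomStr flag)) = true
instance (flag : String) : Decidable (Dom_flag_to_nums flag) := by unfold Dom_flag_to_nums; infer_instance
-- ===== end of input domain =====

-- B packs the same 24-bit big-endian numbers after zero-padding the bytes to a multiple
-- of 3 up front, instead of A's inner shift/OR loop with a per-byte length guard.

-- ===== PORT A =====
-- generator 'chunks(l, n)': the list of slices l[i:i+n] for i in range(0, len(l), n)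
def pvChunks (l : List Int) (n : Int) : List (List Int) :=
  (PySem.List.pyRange 0 (l.length : Int) n).map
    (fun i => PySem.List.slice l (some i) (some (i + n)))

-- flag.encode(): on the ASCII domain, the byte values are the character codes (exact on Dom)
def flag_to_nums (flag : String) : List Int :=
  let flag_data : List Int := flag.toList.map (fun c => (c.toNat : Int))
  (pvChunks flag_data 3).foldl
    (fun nums ck =>
      let num :=
        (PySem.List.pyRange 0 3 1).foldl
          (fun num i =>
            let num := num * 256  -- num <<= 8: low 8 bits are now zero, so the following |= is +
            if i < (ck.length : Int) then num + PySem.List.pyGetD ck i 0 else num)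
          0
      nums ++ [num])
    []

-- ===== PORT B =====
-- int.from_bytes(3-byte chunk, 'big'); consumes the padded byte list three at a time
def pvPack3 : List Int → List Int
  | a :: b :: c :: rest => (a * 65536 + b * 256 + c) :: pvPack3 rest
  | _ => []

def flag_to_nums_alt (flag : String) : List Int :=
  let data : List Int := flag.toList.map (fun c => (c.toNat : Int))
  let padded := data ++ List.replicate (PySem.Int.mod (-(data.length : Int)) 3).toNat 0
  pvPack3 padded

-- ===== PRECONDITION & SPEC =====
def Spec_flag_to_nums (flag : String) (out : List Int) : Prop := out = flag_to_nums_alt flag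
instance (flag : String) (out : List Int) : Decidable (Spec_flag_to_nums flag out) := by unfold Spec_flag_to_nums; infer_instance

-- ===== CLAIM (what is proved, stated in full; the proofs are below) =====
def Claim_equal_flag_to_nums : Prop := ∀ (flag : String), Dom_flag_to_nums flag → Spec_flag_to_nums flag (flag_to_nums flag)

-- ===== LEMMAS AND PROOFS =====

-- A's inner shift/OR loop on one chunk
def pvNumOf (ck : List Int) : Int :=
  (PySem.List.pyRange 0 3 1).foldl
    (fun num i =>
      let num := num * 256
      if i < (ck.length : Int) then num + PySem.List.pyGetD ck i 0 else num)
    0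

lemma pyRange_zero_three : PySem.List.pyRange 0 3 1 = [0, 1, 2] := by decide

lemma pvNumOf_one (a : Int) : pvNumOf [a] = a * 65536 := by
  simp [pvNumOf, pyRange_zero_three, List.foldl, PySem.List.pyGetD, PySem.List.pyGet?,
    PySem.List.pyIdx?]
  ring

lemma pvNumOf_two (a b : Int) : pvNumOf [a, b] = a * 65536 + b * 256 := by
  simp [pvNumOf, pyRange_zero_three, List.foldl, PySem.List.pyGetD, PySem.List.pyGet?,
    PySem.List.pyIdx?]
  ring

lemma pvNumOf_three (a b c : Int) : pvNumOf [a, b, c] = a * 65536 + b * 256 + c := by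
  simp [pvNumOf, pyRange_zero_three, List.foldl, PySem.List.pyGetD, PySem.List.pyGet?,
    PySem.List.pyIdx?]
  ring

-- Python's '%' on a positive divisor, as a Nat padding count
lemma padlen (n : Nat) : (PySem.Int.mod (-(n : Int)) 3).toNat = (3 - n % 3) % 3 := by
  simp [PySem.Int.mod, Int.fmod_eq_emod]; omega

-- a start-anchored slice of width 3 is drop-then-take
lemma slice3 (l : List Int) (i : Int) (hi : 0 ≤ i) :
    PySem.List.slice l (some i) (some (i + 3)) = (l.drop i.toNat).take 3 := by
  rw [PySem.List.slice_toNat l hi (by omega : (0:Int) ≤ i + 3)]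
  congr 1
  omega
lemma chunks3_cons (a b c : Int) (rest : List Int) :
    pvChunks (a :: b :: c :: rest) 3 = [a, b, c] :: pvChunks rest 3 := by
  unfold pvChunks
  rw [PySem.List.pyRange_of_pos _ _ (by norm_num),
      PySem.List.pyRange_of_pos _ _ (by norm_num)]
  have hlen : ((a :: b :: c :: rest).length : Int) = (rest.length : Int) + 3 := by
    simp; omega
  rw [hlen]
  by_cases hr : (0 : Int) < (rest.length : Int)
  · have h1 : (0 : Int) < (rest.length : Int) + 3 := by omega
    have hcount : (((rest.length : Int) + 3 - 0 + 3 - 1) / 3).toNat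
        = (((rest.length : Int) - 0 + 3 - 1) / 3).toNat + 1 := by omega
    rw [if_pos h1, if_pos hr, hcount, List.range_succ_eq_map]
    simp only [List.map_cons, List.map_map]
    refine List.cons_eq_cons.mpr ⟨?_, ?_⟩
    · rw [show ((0:Int) + 3 * ((0:Nat):Int)) = 0 by norm_num]
      rw [slice3 _ _ le_rfl]
      rfl
    · apply List.map_congr_left
      intro k _
      simp only [Function.comp_apply]
      rw [slice3 _ _ (by positivity), slice3 _ _ (by positivity)]
      have h1 : ((0 : Int) + 3 * ((Nat.succ k : Nat) : Int)).toNat = 3 * k + 3 := by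
        omega
      have h3 : ((0 : Int) + 3 * ((k : Nat) : Int)).toNat = 3 * k := by omega
      rw [h1, h3]
      have hdrop : List.drop (3 * k + 3) (a :: b :: c :: rest) = List.drop (3 * k) rest := by
        simp [show 3 * k + 3 = (3 * k) + 1 + 1 + 1 by ring, List.drop_succ_cons]
      rw [hdrop]
  · have h1 : (0 : Int) < (rest.length : Int) + 3 := by omega
    have hr0 : rest.length = 0 := by omega
    have hcount : (((rest.length : Int) + 3 - 0 + 3 - 1) / 3).toNat = 1 := by omega
    rw [if_pos h1, if_neg hr, hcount]
    simp only [List.range_one, List.map_cons, List.map_nil]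
    rw [show ((0:Int) + 3 * ((0:Nat):Int)) = 0 by norm_num]
    rw [slice3 _ _ le_rfl]
    rw [List.length_eq_zero_iff.mp hr0]
    rfl
lemma chunks3_short (data : List Int) (h0 : data ≠ []) (h3 : data.length ≤ 3) :
    pvChunks data 3 = [data] := by
  unfold pvChunks
  rw [PySem.List.pyRange_of_pos _ _ (by norm_num)]
  have hpos : (0 : Int) < (data.length : Int) := by
    have := List.length_pos_iff.mpr h0; omega
  have hcount : (((data.length : Int) - 0 + 3 - 1) / 3).toNat = 1 := by omega
  rw [if_pos hpos, hcount]
  simp only [List.range_one, List.map_cons, List.map_nil]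
  rw [show ((0:Int) + 3 * ((0:Nat):Int)) = 0 by norm_num]
  rw [slice3 _ _ le_rfl]
  simp [List.take_of_length_le h3]

-- main invariant: A's chunk loop output equals B's pack of the zero-padded list
lemma map_numOf_chunks : ∀ (data : List Int),
    (pvChunks data 3).map pvNumOf
      = pvPack3 (data ++ List.replicate (PySem.Int.mod (-(data.length : Int)) 3).toNat 0)
  | [] => by decide
  | [a] => by
      rw [chunks3_short [a] (by simp) (by simp)]
      norm_num [padlen, pvNumOf_one, pvPack3, List.replicate, show Int.toNat 2 = 2 from rfl]
  | [a, b] => by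
      rw [chunks3_short [a, b] (by simp) (by simp)]
      norm_num [padlen, pvNumOf_two, pvPack3, List.replicate, show Int.toNat 1 = 1 from rfl]
  | a :: b :: c :: rest => by
      rw [chunks3_cons a b c rest]
      have hpad : (PySem.Int.mod (-(((a :: b :: c :: rest).length : Nat) : Int)) 3).toNat
          = (PySem.Int.mod (-((rest.length : Nat) : Int)) 3).toNat := by
        rw [padlen, padlen]
        simp only [List.length_cons]
        omega
      rw [List.map_cons, pvNumOf_three, map_numOf_chunks rest, hpad]
      simp [pvPack3]

-- ===== VERDICT (by name: the statement is the Claim_ definition above) =====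
theorem flag_to_nums_spec : Claim_equal_flag_to_nums := by
  intro flag _
  show flag_to_nums flag = flag_to_nums_alt flag
  unfold flag_to_nums flag_to_nums_alt
  simp only []
  rw [PySem.List.foldl_append_singleton_eq_map]
  simp only [List.nil_append]
  have h := map_numOf_chunks (flag.toList.map (fun c => (c.toNat : Int)))
  unfold pvNumOf at h
  exact h
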